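-- pv_equiv track=rewrite | github.com/krzyswys/Algorythms-and-data-structures | Dynamic problems/K-ŁadnaSumaZad3k.py | ksuma
-- ===== SOURCE A (Python) =====
-- def ksuma(T, k):
--     n = len(T)
--     F = [float("inf") for _ in range(n)]
--
--     for i in range(k):
--         F[i] = T[i]
--
--     for i in range(k, n):
--         best = float("inf")
--         for j in range(i - k, i):
--             best = min(best, F[j])
--
--         F[i] = T[i] + best
--
--     return min(F[-k:])
-- ===== SOURCE B (Python) =====
-- def ksuma(T, k):
--     n = len(T)
--     F = []
--     dq = []  # pairs (index, F-value), values strictly increasing front to back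
--     for i in range(k):          # seed: the first k DP values are T[i]
--         f = T[i]
--         while dq and dq[-1][1] >= f:
--             dq.pop()
--         dq.append((i, f))
--         F.append(f)
--     for i in range(k, n):       # DP step: window minimum sits at the deque front
--         while dq[0][0] < i - k:
--             dq.pop(0)
--         f = T[i] + dq[0][1]
--         while dq and dq[-1][1] >= f:
--             dq.pop()
--         dq.append((i, f))
--         F.append(f)
--     return min(F[n - k:])
-- ===== Notes on version B (the rewrite author's own statement) =====
-- stated objective: faster
-- what changed: Replaces the inner O(k) rescan computing min(F[i-k:i]) with a monotonic deque of (index, value) pairs maintained in one pass, so each DP value reads the window minimum at the deque front.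
-- outside the precondition, e.g. on ksuma([1, 2], 0): A returns inf, B raises IndexError
import Mathlib
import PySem

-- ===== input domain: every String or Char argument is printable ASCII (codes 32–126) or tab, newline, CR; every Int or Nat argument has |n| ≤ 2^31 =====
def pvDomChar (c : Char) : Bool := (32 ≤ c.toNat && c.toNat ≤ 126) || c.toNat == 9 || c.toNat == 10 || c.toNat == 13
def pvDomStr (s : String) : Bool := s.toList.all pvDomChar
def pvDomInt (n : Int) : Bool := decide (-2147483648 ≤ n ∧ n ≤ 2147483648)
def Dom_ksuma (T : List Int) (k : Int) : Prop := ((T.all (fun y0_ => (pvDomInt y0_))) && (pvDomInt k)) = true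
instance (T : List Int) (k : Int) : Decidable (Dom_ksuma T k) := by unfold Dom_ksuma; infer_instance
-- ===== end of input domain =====

-- B replaces A's inner O(k) rescan of the DP window with a monotonic deque, giving the
-- window minimum at the deque front in one pass (objective: faster).

-- ===== PORT A =====
-- Python's float("inf") sentinel is ported as `none` (Option Int); `min` with it is pvOptMin.
-- Under Pre_ every value that reaches the result is an int (some _), so the final `.getD`-style
-- fallback 0 is unreachable; list writes/reads are in range under Pre_ exactly as in Python.
def pvOptMin (a b : Option Int) : Option Int :=
  match a, b with
  | none, b => b
  | some a, none => some a
  | some a, some b => if b < a then some b else some a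

def ksuma (T : List Int) (k : Int) : Int :=
  let n : Int := (T.length : Int)
  let F : List (Option Int) := (PySem.List.pyRange 0 n 1).map (fun _ => none)
  let F := (PySem.List.pyRange 0 k 1).foldl (fun F i =>
      F.set i.toNat (some (PySem.List.pyGetD T i 0))) F
  let F := (PySem.List.pyRange k n 1).foldl (fun F i =>
      let best := (PySem.List.pyRange (i - k) i 1).foldl
          (fun best j => pvOptMin best (PySem.List.pyGetD F j none)) none
      F.set i.toNat (match best with
        | some b => some (PySem.List.pyGetD T i 0 + b)
        | none => none)) F
  match (PySem.List.slice F (some (-k)) none).foldl pvOptMin none with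
  | some m => m
  | none => 0   -- only reachable outside Pre_, where Python returns float('inf')

-- ===== PORT B =====
-- transliteration of Source B: `while dq and dq[-1][1] >= f: dq.pop()` (pop from the back)
def pvPopBack (f : Int) : List (Int × Int) → List (Int × Int)
  | [] => []
  | e :: rest =>
    match pvPopBack f rest with
    | [] => if f ≤ e.2 then [] else [e]
    | r => e :: r

def ksuma_alt (T : List Int) (k : Int) : Int :=
  let n : Int := (T.length : Int)
  -- seed loop: `for i in range(k): f = T[i]; …` (T[i] raises outside Pre_)
  let seeded := (PySem.List.pyRange 0 k 1).foldl
    (fun (st : List Int × List (Int × Int)) (i : Int) =>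
      let f : Int := PySem.List.pyGetD T i 0
      (st.1 ++ [f], pvPopBack f st.2 ++ [(i, f)])) ([], [])
  -- DP loop: `while dq[0][0] < i - k: dq.pop(0)` is dropWhile (raises only outside Pre_)
  let Fdq := (PySem.List.pyRange k n 1).foldl
    (fun (st : List Int × List (Int × Int)) (i : Int) =>
      let dq := st.2.dropWhile (fun e => decide (e.1 < i - k))
      let f : Int := PySem.List.pyGetD T i 0 + ((dq.head?.map Prod.snd).getD 0)
      (st.1 ++ [f], pvPopBack f dq ++ [(i, f)])) seeded
  match PySem.List.slice Fdq.1 (some (n - k)) none with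
  | [] => 0   -- min([]) raises in Python; only reachable outside Pre_
  | h :: t => t.foldl (fun a b => if b < a then b else a) h

-- ===== PRECONDITION & SPEC =====
-- Pre_ excludes k < 1 (A returns float('inf'), which is not an int) and k > len(T)
-- (A raises IndexError).
def Pre_ksuma (T : List Int) (k : Int) : Prop := 1 ≤ k ∧ k ≤ (T.length : Int)
instance (T : List Int) (k : Int) : Decidable (Pre_ksuma T k) := by unfold Pre_ksuma; infer_instance
def pvWitness_ksuma : List Int × Int := ([3, -2, 7, 1], 2)

def Spec_ksuma (T : List Int) (k : Int) (out : Int) : Prop := out = ksuma_alt T k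
instance (T : List Int) (k : Int) (out : Int) : Decidable (Spec_ksuma T k out) := by unfold Spec_ksuma; infer_instance

-- ===== CLAIM (what is proved, stated in full; the proofs are below) =====
def Claim_equal_ksuma : Prop := ∀ (T : List Int) (k : Int), Dom_ksuma T k → Pre_ksuma T k → Spec_ksuma T k (ksuma T k)

-- ===== LEMMAS AND PROOFS =====

-- common specification: pvG T k i = [F 0, …, F (i-1)], the DP values of the recurrence
def pvListMin : List Int → Int
  | [] => 0
  | h :: t => t.foldl min h

def pvG (T : List Int) (k : Nat) : Nat → List Int
  | 0 => []
  | i + 1 =>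
    let F := pvG T k i
    F ++ [if i < k then T.getD i 0 else T.getD i 0 + pvListMin (F.drop (i - k))]

def pvgv (T : List Int) (k : Nat) (i : Nat) : Int :=
  if i < k then T.getD i 0 else T.getD i 0 + pvListMin ((pvG T k i).drop (i - k))

theorem pvG_succ (T : List Int) (k i : Nat) :
    pvG T k (i + 1) = pvG T k i ++ [pvgv T k i] := by
  simp [pvG, pvgv]

theorem pvG_eq_map (T : List Int) (k i : Nat) :
    pvG T k i = (List.range i).map (pvgv T k) := by
  induction i with
  | zero => simp [pvG]
  | succ i ih => rw [pvG_succ, ih, List.range_succ, List.map_append]; rfl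

theorem pvG_length (T : List Int) (k i : Nat) : (pvG T k i).length = i := by
  simp [pvG_eq_map]

theorem pvG_getD (T : List Int) (k : Nat) {m i : Nat} (h : m < i) :
    (pvG T k i).getD m 0 = pvgv T k m := by
  rw [pvG_eq_map, List.getD_eq_getElem _ _ (by simpa using h), List.getElem_map,
    List.getElem_range]

theorem pv_foldl_min_le (t : List Int) (a : Int) :
    t.foldl min a ≤ a ∧ ∀ x ∈ t, t.foldl min a ≤ x := by
  induction t generalizing a with
  | nil => simp
  | cons h t ih =>
    have H := ih (min a h)
    simp only [List.foldl_cons]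
    refine ⟨le_trans H.1 (min_le_left _ _), ?_⟩
    intro x hx
    rcases List.mem_cons.mp hx with rfl | hx
    · exact le_trans H.1 (min_le_right _ _)
    · exact H.2 x hx

theorem pv_foldl_min_mem (t : List Int) (a : Int) :
    t.foldl min a = a ∨ t.foldl min a ∈ t := by
  induction t generalizing a with
  | nil => simp
  | cons h t ih =>
    simp only [List.foldl_cons]
    rcases ih (min a h) with H | H
    · rw [H]
      rcases le_total a h with hab | hab
      · left; exact min_eq_left hab
      · right; rw [min_eq_right hab]; exact List.mem_cons_self
    · right; exact List.mem_cons_of_mem _ H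

theorem pvListMin_mem (l : List Int) (h : l ≠ []) : pvListMin l ∈ l := by
  match l with
  | h₀ :: t =>
    simp only [pvListMin]
    rcases pv_foldl_min_mem t h₀ with H | H
    · rw [H]; exact List.mem_cons_self
    · exact List.mem_cons_of_mem _ H

theorem pvListMin_le (l : List Int) (x : Int) (hx : x ∈ l) : pvListMin l ≤ x := by
  match l with
  | h₀ :: t =>
    simp only [pvListMin]
    rcases List.mem_cons.mp hx with rfl | hx
    · exact (pv_foldl_min_le t x).1
    · exact (pv_foldl_min_le t h₀).2 x hx

theorem pvOptMin_some_some (a b : Int) : pvOptMin (some a) (some b) = some (min a b) := by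
  simp only [pvOptMin]
  rcases lt_or_ge b a with h | h
  · rw [if_pos h, min_eq_right (le_of_lt h)]
  · rw [if_neg (not_lt.mpr h), min_eq_left h]

theorem pv_foldl_pvOptMin_some (t : List Int) (a : Int) :
    t.foldl (fun b v => pvOptMin b (some v)) (some a) = some (t.foldl min a) := by
  induction t generalizing a with
  | nil => simp
  | cons h t ih => simp only [List.foldl_cons, pvOptMin_some_some]; exact ih (min a h)

theorem pv_foldl_pvOptMin_none (l : List Int) (h : l ≠ []) :
    l.foldl (fun b v => pvOptMin b (some v)) none = some (pvListMin l) := by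
  match l with
  | h₀ :: t =>
    simp only [List.foldl_cons, pvListMin]
    exact pv_foldl_pvOptMin_some t h₀

theorem pv_getD_map_some (l : List Int) (m : Nat) (h : m < l.length) :
    (l.map some).getD m none = some (l.getD m 0) := by
  rw [List.getD_eq_getElem _ _ (by simpa using h), List.getD_eq_getElem _ _ h,
    List.getElem_map]

-- A side, loop 1: the first k cells are set to T[i]
theorem pvLoopA1 (T : List Int) (K : Nat) :
    ∀ j : Nat, j ≤ K → j ≤ T.length →
    (PySem.List.pyRange 0 (j : Int)).foldl
        (fun F i => F.set i.toNat (some (PySem.List.pyGetD T i 0)))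
        (List.replicate T.length (none : Option Int))
    = (pvG T K j).map some ++ List.replicate (T.length - j) (none : Option Int) := by
  intro j
  induction j with
  | zero =>
    intro _ _
    simp only [Nat.cast_zero]
    rw [PySem.List.pyRange_one_eq_nil le_rfl]
    simp [pvG]
  | succ j ih =>
    intro hK hn
    have hc : ((j + 1 : Nat) : Int) = (j : Int) + 1 := by push_cast; ring
    rw [hc, PySem.List.pyRange_one_succ_right (by omega), List.foldl_append,
      ih (by omega) (by omega)]
    simp only [List.foldl_cons, List.foldl_nil, Int.toNat_natCast,
      PySem.List.pyGetD_natCast]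
    rw [List.set_append]
    have hlen : ((pvG T K j).map some).length = j := by simp [pvG_length]
    rw [hlen]
    simp only [lt_irrefl, if_false, Nat.sub_self]
    have hrep : T.length - j = (T.length - (j + 1)) + 1 := by omega
    rw [hrep, List.replicate_succ, List.set_cons_zero, pvG_succ, List.map_append]
    have hv : pvgv T K j = T.getD j 0 := by simp [pvgv, show j < K by omega]
    rw [hv]
    simp

-- window fold: A's inner loop over range(i-k, i) computes the minimum of a slice
theorem pvWinFold (L : List Int) (M : List (Option Int))
    (hread : ∀ m : Nat, m < L.length → PySem.List.pyGetD M (m : Int) none = some (L.getD m 0)) :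
    ∀ (c a : Nat) (acc : Option Int), a + c ≤ L.length →
    (PySem.List.pyRange (a : Int) ((a : Int) + (c : Int))).foldl
        (fun b x => pvOptMin b (PySem.List.pyGetD M x none)) acc
    = ((L.drop a).take c).foldl (fun b v => pvOptMin b (some v)) acc := by
  intro c
  induction c with
  | zero => intro a acc _; simp [PySem.List.pyRange_one_eq_nil]
  | succ c ih =>
    intro a acc h
    have ha : a < L.length := by omega
    rw [PySem.List.pyRange_one_cons (by omega : (a : Int) < (a : Int) + ((c + 1 : Nat) : Int))]
    have hc2 : ((a : Int) + ((c + 1 : Nat) : Int)) = ((a + 1 : Nat) : Int) + (c : Int) := by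
      push_cast; ring
    rw [hc2]
    have hc3 : ((a : Int) + 1) = ((a + 1 : Nat) : Int) := by push_cast; ring
    rw [List.foldl_cons, hc3, hread a ha, ih (a + 1) _ (by omega)]
    rw [List.drop_eq_getElem_cons ha, List.take_succ_cons, List.foldl_cons,
      List.getD_eq_getElem _ _ ha]

-- A side, loop 2: each further cell gets T[i] + min of the previous k cells
theorem pvLoopA2 (T : List Int) (wk : Nat) (h1 : 1 ≤ wk) :
    ∀ j : Nat, wk ≤ j → j ≤ T.length →
    (PySem.List.pyRange (wk : Int) (j : Int)).foldl
        (fun F i =>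
          let best := (PySem.List.pyRange (i - (wk : Int)) i).foldl
              (fun best j => pvOptMin best (PySem.List.pyGetD F j none)) none
          F.set i.toNat (match best with
            | some b => some (PySem.List.pyGetD T i 0 + b)
            | none => none))
        ((pvG T wk wk).map some ++ List.replicate (T.length - wk) (none : Option Int))
    = (pvG T wk j).map some ++ List.replicate (T.length - j) (none : Option Int) := by
  intro j
  induction j with
  | zero => intro h _; omega
  | succ j ih =>
    intro hK hn
    by_cases hj : j + 1 = wk
    · subst hj
      rw [PySem.List.pyRange_one_eq_nil le_rfl, List.foldl_nil]
    · have hwj : wk ≤ j := by omega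
      have hc : ((j + 1 : Nat) : Int) = (j : Int) + 1 := by push_cast; ring
      rw [hc, PySem.List.pyRange_one_succ_right (by exact_mod_cast hwj), List.foldl_append,
        ih hwj (by omega)]
      set Sj := (pvG T wk j).map some ++ List.replicate (T.length - j) (none : Option Int) with hSj
      simp only [List.foldl_cons, List.foldl_nil]
      -- the inner fold computes the window minimum
      have hread : ∀ m : Nat, m < (pvG T wk j).length →
          PySem.List.pyGetD Sj (m : Int) none = some ((pvG T wk j).getD m 0) := by
        intro m hm
        rw [pvG_length] at hm
        rw [hSj, PySem.List.pyGetD_natCast, List.getD_append _ _ _ _ (by simpa [pvG_length] using hm),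
          pv_getD_map_some _ _ (by simpa [pvG_length] using hm)]
      have hrange : ((j : Int) - (wk : Int)) = ((j - wk : Nat) : Int) := by
        push_cast [hwj]; ring
      have hbest := pvWinFold (pvG T wk j) Sj hread wk (j - wk) none
        (by rw [pvG_length]; omega)
      rw [← hrange] at hbest
      rw [show ((j : Int) - (wk : Int) + (wk : Int)) = (j : Int) from by ring] at hbest
      rw [hbest]
      have hwin : (((pvG T wk j).drop (j - wk)).take wk) = (pvG T wk j).drop (j - wk) := by
        apply List.take_of_length_le
        simp only [List.length_drop, pvG_length]
        omega
      rw [hwin, pv_foldl_pvOptMin_none _ (by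
        have : ((pvG T wk j).drop (j - wk)).length = wk := by simp [pvG_length]; omega
        intro hnil; rw [hnil] at this; simp at this; omega)]
      -- now the set
      simp only [Int.toNat_natCast, PySem.List.pyGetD_natCast]
      rw [List.set_append]
      have hlen : ((pvG T wk j).map some).length = j := by simp [pvG_length]
      rw [hlen]
      simp only [lt_irrefl, if_false, Nat.sub_self]
      have hrep : T.length - j = (T.length - (j + 1)) + 1 := by omega
      rw [hrep, List.replicate_succ, List.set_cons_zero, pvG_succ, List.map_append]
      have hv : pvgv T wk j = T.getD j 0 + pvListMin ((pvG T wk j).drop (j - wk)) := by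
        simp [pvgv, show ¬ j < wk by omega]
      rw [hv]
      simp

theorem ksuma_eq_spec (T : List Int) (k : Int) (h1 : 1 ≤ k) (h2 : k ≤ (T.length : Int)) :
    ksuma T k = pvListMin ((pvG T k.toNat T.length).drop (T.length - k.toNat)) := by
  obtain ⟨wk, rfl⟩ : ∃ wk : Nat, (wk : Int) = k := ⟨k.toNat, Int.toNat_of_nonneg (by omega)⟩
  have hwk1 : 1 ≤ wk := by exact_mod_cast h1
  have hwkn : wk ≤ T.length := by exact_mod_cast h2
  simp only [ksuma]
  -- the initial list of float('inf') sentinels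
  have hinit : ((PySem.List.pyRange 0 ((T.length : Nat) : Int)).map
      (fun _ => (none : Option Int))) = List.replicate T.length (none : Option Int) := by
    rw [show ((PySem.List.pyRange 0 ((T.length : Nat) : Int)).map
        (fun _ => (none : Option Int))) = List.replicate ((PySem.List.pyRange 0 ((T.length : Nat) : Int)).length) none from List.map_const ..]
    congr 1
    rw [PySem.List.length_pyRange_one]
    omega
  rw [hinit, pvLoopA1 T wk wk le_rfl hwkn, pvLoopA2 T wk hwk1 T.length hwkn le_rfl]
  simp only [Nat.sub_self, List.replicate_zero, List.append_nil]
  rw [show (-(wk : Int)) = (-((wk : Nat) : Int)) from rfl,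
    PySem.List.slice_from_neg_natCast _ wk hwk1]
  have hlenmap : ((pvG T wk T.length).map some).length = T.length := by simp [pvG_length]
  rw [hlenmap, ← List.map_drop, List.foldl_map]
  rw [pv_foldl_pvOptMin_none _ (by
    have : ((pvG T wk T.length).drop (T.length - wk)).length = wk := by
      simp [pvG_length]; omega
    intro hnil; rw [hnil] at this; simp at this; omega)]
  simp [Int.toNat_natCast]


-- common specification: pvG T k i is the list [F 0, …, F (i-1)] of DP values
-- B side: the pure monotonic-deque of the first i DP values (push-only form)
def pvMono (T : List Int) (wk : Nat) : Nat → List (Int × Int)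
  | 0 => []
  | i + 1 => (pvMono T wk i).takeWhile (fun e => decide (e.2 < pvgv T wk i))
      ++ [((i : Int), pvgv T wk i)]

theorem pvMono_good (T : List Int) (wk : Nat) (i : Nat) :
    (pvMono T wk i).Pairwise (fun a b => a.1 < b.1 ∧ a.2 < b.2) ∧
    ∀ e ∈ pvMono T wk i, ∃ j : Nat, j < i ∧ e = ((j : Int), pvgv T wk j) := by
  induction i with
  | zero => simp [pvMono]
  | succ i ih =>
    constructor
    · rw [pvMono, List.pairwise_append]
      refine ⟨List.Pairwise.sublist (List.takeWhile_sublist _) ih.1, by simp, ?_⟩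
      intro a ha b hb
      obtain ⟨ja, hja, hae⟩ := ih.2 a ((List.takeWhile_sublist _).mem ha)
      have hval : a.2 < pvgv T wk i := by
        have := List.mem_takeWhile_imp ha
        simpa using this
      rcases List.mem_singleton.mp hb with rfl
      refine ⟨?_, hval⟩
      rw [hae]
      simpa using (by exact_mod_cast hja : (ja : Int) < (i : Int))
    · intro e he
      rw [pvMono, List.mem_append] at he
      rcases he with he | he
      · obtain ⟨ja, hja, hae⟩ := ih.2 e ((List.takeWhile_sublist _).mem he)
        exact ⟨ja, by omega, hae⟩
      · rcases List.mem_singleton.mp he with rfl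
        exact ⟨i, by omega, rfl⟩

theorem pv_takeWhile_eq_filter (l : List (Int × Int)) (c : Int)
    (h : l.Pairwise (fun a b => a.2 < b.2)) :
    l.takeWhile (fun e => decide (e.2 < c)) = l.filter (fun e => decide (e.2 < c)) := by
  induction l with
  | nil => rfl
  | cons e rest ih =>
    rw [List.pairwise_cons] at h
    by_cases hp : e.2 < c
    · simp only [List.takeWhile_cons, List.filter_cons, decide_eq_true hp, if_pos rfl]
      rw [ih h.2]
      rfl
    · simp only [List.takeWhile_cons, List.filter_cons, decide_eq_false hp]
      simp only [Bool.false_eq_true, if_false, cond_false]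
      symm
      rw [List.filter_eq_nil_iff]
      intro x hx
      have : e.2 < x.2 := h.1 x hx
      simp only [decide_eq_true_eq]
      omega

theorem pv_dropWhile_eq_filter (l : List (Int × Int)) (t : Int)
    (h : l.Pairwise (fun a b => a.1 < b.1)) :
    l.dropWhile (fun e => decide (e.1 < t)) = l.filter (fun e => decide (t ≤ e.1)) := by
  induction l with
  | nil => rfl
  | cons e rest ih =>
    rw [List.pairwise_cons] at h
    by_cases hp : e.1 < t
    · simp only [List.dropWhile_cons, List.filter_cons, decide_eq_true hp, if_pos rfl,
        decide_eq_false (show ¬ t ≤ e.1 by omega)]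
      rw [ih h.2]
      rfl
    · simp only [List.dropWhile_cons, List.filter_cons, decide_eq_false hp,
        decide_eq_true (show t ≤ e.1 by omega)]
      simp only [Bool.false_eq_true, if_false, cond_true]
      congr 1
      symm
      rw [List.filter_eq_self]
      intro x hx
      have : e.1 < x.1 := h.1 x hx
      simp only [decide_eq_true_eq]
      omega

theorem pv_popBack_eq_filter (f : Int) (l : List (Int × Int))
    (h : l.Pairwise (fun a b => a.2 < b.2)) :
    pvPopBack f l = l.filter (fun e => decide (e.2 < f)) := by
  induction l with
  | nil => rfl
  | cons e rest ih =>
    rw [List.pairwise_cons] at h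
    have ihr := ih h.2
    cases hfr : rest.filter (fun e => decide (e.2 < f)) with
    | nil =>
      rw [pvPopBack, ihr, List.filter_cons, hfr]
      by_cases hp : f ≤ e.2
      · simp [hp, show ¬ e.2 < f by omega]
      · simp [hp, show e.2 < f by omega]
    | cons r rs =>
      have hrmem : r ∈ rest.filter (fun e => decide (e.2 < f)) := by
        rw [hfr]; exact List.mem_cons_self
      rw [List.mem_filter] at hrmem
      have hrf : r.2 < f := by simpa using hrmem.2
      have herf : e.2 < f := lt_trans (h.1 r hrmem.1) hrf
      rw [pvPopBack, ihr, List.filter_cons, hfr]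
      simp [herf]

theorem pv_mono_complete (T : List Int) (wk : Nat) :
    ∀ i : Nat, ∀ j : Nat, j < i →
    ((j : Int), pvgv T wk j) ∈ pvMono T wk i ∨
    ∃ j' : Nat, j < j' ∧ j' < i ∧ pvgv T wk j' ≤ pvgv T wk j := by
  intro i
  induction i with
  | zero => intro j hj; omega
  | succ i ih =>
    intro j hj
    by_cases hji : j = i
    · subst hji
      left
      rw [pvMono, List.mem_append]
      right
      exact List.mem_singleton.mpr rfl
    · rcases ih j (by omega) with hmem | ⟨j', h1, h2, h3⟩
      · by_cases hlt : pvgv T wk j < pvgv T wk i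
        · left
          rw [pvMono, List.mem_append]
          left
          rw [pv_takeWhile_eq_filter _ _ ((pvMono_good T wk i).1.imp (fun h => h.2))]
          rw [List.mem_filter]
          exact ⟨hmem, by simpa using hlt⟩
        · right
          exact ⟨i, by omega, by omega, by omega⟩
      · right
        exact ⟨j', h1, by omega, h3⟩

theorem pv_head_le (l : List (Int × Int)) (h : l.Pairwise (fun a b => a.2 < b.2))
    (e : Int × Int) (he : e ∈ l) (h0 : Int × Int) (hh : l.head? = some h0) : h0.2 ≤ e.2 := by
  cases l with
  | nil => cases he
  | cons a rest =>
    rw [List.head?_cons, Option.some.injEq] at hh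
    subst hh
    rw [List.pairwise_cons] at h
    rcases List.mem_cons.mp he with rfl | he
    · exact le_rfl
    · exact le_of_lt (h.1 e he)

-- the evicted deque's front value is the minimum of the current window
theorem pvWindow (T : List Int) (wk : Nat) (hwk : 1 ≤ wk) (j : Nat) (hj : wk ≤ j) :
    ((pvMono T wk j).filter (fun e => decide ((j : Int) - (wk : Int) ≤ e.1))).head?.map Prod.snd
      = some (pvListMin ((pvG T wk j).drop (j - wk))) := by
  have hgood := pvMono_good T wk j
  have hp2 : (pvMono T wk j).Pairwise (fun a b => a.2 < b.2) := hgood.1.imp (fun h => h.2)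
  set l := (pvMono T wk j).filter (fun e => decide ((j : Int) - (wk : Int) ≤ e.1)) with hl
  have hlp2 : l.Pairwise (fun a b => a.2 < b.2) := hp2.filter _
  -- the last DP index survives in l, so l is nonempty
  have hlast : (((j - 1 : Nat) : Int), pvgv T wk (j - 1)) ∈ pvMono T wk j := by
    rcases pv_mono_complete T wk j (j - 1) (by omega) with hm | ⟨j', h1, h2, _⟩
    · exact hm
    · omega
  have hlastl : (((j - 1 : Nat) : Int), pvgv T wk (j - 1)) ∈ l := by
    rw [hl, List.mem_filter]
    refine ⟨hlast, ?_⟩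
    simp only [decide_eq_true_eq]
    push_cast [show 1 ≤ j by omega]
    omega
  obtain ⟨h0, rest, hcons⟩ : ∃ h0 rest, l = h0 :: rest := by
    cases hx : l with
    | nil => rw [hx] at hlastl; cases hlastl
    | cons a b => exact ⟨a, b, rfl⟩
  have hh0 : l.head? = some h0 := by rw [hcons]; rfl
  have hh0l : h0 ∈ l := by rw [hcons]; exact List.mem_cons_self
  have hh0mono : h0 ∈ pvMono T wk j := (List.mem_filter.mp (hl ▸ hh0l)).1
  obtain ⟨j0, hj0, he0⟩ := hgood.2 h0 hh0mono
  have hj0lo : (j : Int) - (wk : Int) ≤ (j0 : Int) := by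
    have := (List.mem_filter.mp (hl ▸ hh0l)).2
    rw [he0] at this
    simpa using this
  -- h0.2 is a lower bound for all window values
  have key : ∀ d : Nat, ∀ m : Nat, j - m ≤ d → j - wk ≤ m → m < j → h0.2 ≤ pvgv T wk m := by
    intro d
    induction d with
    | zero => intro m h1 _ h3; omega
    | succ d ihd =>
      intro m h1 h2 h3
      rcases pv_mono_complete T wk j m h3 with hm | ⟨m', hm1, hm2, hm3⟩
      · have hminl : ((m : Int), pvgv T wk m) ∈ l := by
          rw [hl, List.mem_filter]
          refine ⟨hm, ?_⟩
          simp only [decide_eq_true_eq]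
          omega
        exact pv_head_le l hlp2 _ hminl h0 hh0
      · exact le_trans (ihd m' (by omega) (by omega) hm2) hm3
  -- h0.2 is a member of the window
  have hwinlen : ((pvG T wk j).drop (j - wk)).length = wk := by
    simp only [List.length_drop, pvG_length]
    omega
  have hgetwin : ∀ idx : Nat, idx < wk → ((pvG T wk j).drop (j - wk)).getD idx 0 = pvgv T wk (j - wk + idx) := by
    intro idx hidx
    rw [List.getD_eq_getElem _ _ (by omega), List.getElem_drop, ← List.getD_eq_getElem _ 0 (by rw [pvG_length]; omega)]
    exact pvG_getD T wk (by omega)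
  have hmem0 : h0.2 ∈ (pvG T wk j).drop (j - wk) := by
    have hidx : j0 - (j - wk) < wk := by omega
    have hv := hgetwin (j0 - (j - wk)) hidx
    rw [show j - wk + (j0 - (j - wk)) = j0 by omega] at hv
    have hmm : ((pvG T wk j).drop (j - wk)).getD (j0 - (j - wk)) 0 ∈ (pvG T wk j).drop (j - wk) := by
      rw [List.getD_eq_getElem _ _ (by rw [hwinlen]; omega)]
      exact List.getElem_mem _
    rw [hv] at hmm
    rw [he0]
    exact hmm
  have hlb : ∀ x ∈ (pvG T wk j).drop (j - wk), h0.2 ≤ x := by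
    intro x hx
    obtain ⟨idx, hidx, hxe⟩ := List.mem_iff_getElem.mp hx
    rw [hwinlen] at hidx
    have := hgetwin idx hidx
    rw [List.getD_eq_getElem _ _ (by rw [hwinlen]; omega)] at this
    rw [← hxe, this]
    exact key j (j - wk + idx) (by omega) (by omega) (by omega)
  have hminval : pvListMin ((pvG T wk j).drop (j - wk)) = h0.2 := by
    apply le_antisymm
    · exact pvListMin_le _ _ hmem0
    · exact hlb _ (pvListMin_mem _ (by intro hnil; rw [hnil] at hwinlen; simp at hwinlen; omega))
  rw [hcons, hminval, he0]
  simp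

-- B side, seed loop: pushes the first wk DP values, building the monotonic deque
theorem pvLoopB1 (T : List Int) (wk : Nat) :
    ∀ j : Nat, j ≤ wk →
    (PySem.List.pyRange 0 (j : Int) 1).foldl
        (fun (st : List Int × List (Int × Int)) (i : Int) =>
          let f : Int := PySem.List.pyGetD T i 0
          (st.1 ++ [f], pvPopBack f st.2 ++ [(i, f)]))
        ([], [])
    = (pvG T wk j, pvMono T wk j) := by
  intro j
  induction j with
  | zero =>
    intro _
    simp only [Nat.cast_zero]
    rw [PySem.List.pyRange_one_eq_nil le_rfl]
    simp [pvG, pvMono]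
  | succ j ih =>
    intro hj
    have hc : ((j + 1 : Nat) : Int) = (j : Int) + 1 := by push_cast; ring
    rw [hc, PySem.List.pyRange_one_succ_right (by omega), List.foldl_append, ih (by omega)]
    simp only [List.foldl_cons, List.foldl_nil]
    have hp2 : (pvMono T wk j).Pairwise (fun a b => a.2 < b.2) :=
      (pvMono_good T wk j).1.imp (fun h => h.2)
    have hfval : PySem.List.pyGetD T (j : Int) 0 = pvgv T wk j := by
      rw [PySem.List.pyGetD_natCast]
      simp [pvgv, show j < wk by omega]
    rw [hfval]
    simp only [Prod.mk.injEq]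
    refine ⟨(pvG_succ T wk j).symm, ?_⟩
    rw [pv_popBack_eq_filter _ _ hp2]
    conv_rhs => rw [pvMono]
    rw [pv_takeWhile_eq_filter _ _ hp2]

-- B side, DP loop: the fold maintains the DP prefix and the evicted monotonic deque
theorem pvLoopB2 (T : List Int) (wk : Nat) (hwk : 1 ≤ wk) :
    ∀ j : Nat, wk ≤ j → j ≤ T.length →
    (PySem.List.pyRange (wk : Int) (j : Int) 1).foldl
        (fun (st : List Int × List (Int × Int)) (i : Int) =>
          let dq := st.2.dropWhile (fun e => decide (e.1 < i - (wk : Int)))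
          let f : Int := PySem.List.pyGetD T i 0 + ((dq.head?.map Prod.snd).getD 0)
          (st.1 ++ [f], pvPopBack f dq ++ [(i, f)]))
        (pvG T wk wk, pvMono T wk wk)
    = (pvG T wk j, (pvMono T wk j).filter (fun e => decide ((j : Int) - 1 - (wk : Int) ≤ e.1))) := by
  intro j
  induction j with
  | zero => intro h _; omega
  | succ j ih =>
    intro hK hn
    by_cases hj : j + 1 = wk
    · rw [show ((j + 1 : Nat) : Int) = (wk : Int) from by exact_mod_cast hj,
        PySem.List.pyRange_one_eq_nil le_rfl, List.foldl_nil, hj]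
      simp only [Prod.mk.injEq, true_and]
      symm
      rw [List.filter_eq_self]
      intro e he
      obtain ⟨m, _, he2⟩ := (pvMono_good T wk wk).2 e he
      rw [he2]
      simp only [decide_eq_true_eq]
      have : (0 : Int) ≤ (m : Int) := by positivity
      omega
    · have hwj : wk ≤ j := by omega
      have hc : ((j + 1 : Nat) : Int) = (j : Int) + 1 := by push_cast; ring
      rw [hc, PySem.List.pyRange_one_succ_right (by exact_mod_cast hwj), List.foldl_append,
        ih hwj (by omega)]
      simp only [List.foldl_cons, List.foldl_nil]
      have hgood := pvMono_good T wk j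
      have hp1 : (pvMono T wk j).Pairwise (fun a b => a.1 < b.1) := hgood.1.imp (fun h => h.1)
      have hp2 : (pvMono T wk j).Pairwise (fun a b => a.2 < b.2) := hgood.1.imp (fun h => h.2)
      have hdq : (List.filter (fun e => decide ((j : Int) - 1 - (wk : Int) ≤ e.1))
            (pvMono T wk j)).dropWhile (fun e => decide (e.1 < (j : Int) - (wk : Int)))
          = (pvMono T wk j).filter (fun e => decide ((j : Int) - (wk : Int) ≤ e.1)) := by
        rw [pv_dropWhile_eq_filter _ _ (hp1.filter _), List.filter_filter]
        apply List.filter_congr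
        intro x _
        by_cases h1 : ((j : Int) - (wk : Int) ≤ x.1) <;>
          by_cases h2 : ((j : Int) - 1 - (wk : Int) ≤ x.1) <;>
          simp [h1, h2] <;> omega
      rw [hdq]
      have hheadD : ((((pvMono T wk j).filter
            (fun e => decide ((j : Int) - (wk : Int) ≤ e.1))).head?.map Prod.snd).getD 0)
          = pvListMin ((pvG T wk j).drop (j - wk)) := by
        rw [pvWindow T wk hwk j hwj]
        rfl
      rw [hheadD]
      have hfval : PySem.List.pyGetD T (j : Int) 0 + pvListMin ((pvG T wk j).drop (j - wk))
          = pvgv T wk j := by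
        rw [PySem.List.pyGetD_natCast]
        simp [pvgv, show ¬ j < wk by omega]
      rw [hfval]
      simp only [Prod.mk.injEq]
      refine ⟨(pvG_succ T wk j).symm, ?_⟩
      rw [pv_popBack_eq_filter _ _ (hp2.filter _)]
      conv_rhs => rw [pvMono]
      rw [pv_takeWhile_eq_filter _ _ hp2, List.filter_append]
      have h1 : (List.filter (fun e => decide ((j : Int) + 1 - 1 - (wk : Int) ≤ e.1))
          [((j : Int), pvgv T wk j)]) = [((j : Int), pvgv T wk j)] := by
        rw [List.filter_eq_self]
        intro e he
        rcases List.mem_singleton.mp he with rfl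
        simp only [decide_eq_true_eq]
        omega
      rw [h1]
      congr 1
      rw [List.filter_filter, List.filter_filter]
      apply List.filter_congr
      intro x _
      by_cases h1 : (x.2 < pvgv T wk j) <;>
        by_cases h2 : ((j : Int) - (wk : Int) ≤ x.1) <;>
        by_cases h3 : ((j : Int) + 1 - 1 - (wk : Int) ≤ x.1) <;>
        simp [h1, h2, h3]

theorem ksuma_alt_eq_spec (T : List Int) (k : Int) (h1 : 1 ≤ k) (h2 : k ≤ (T.length : Int)) :
    ksuma_alt T k = pvListMin ((pvG T k.toNat T.length).drop (T.length - k.toNat)) := by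
  obtain ⟨wk, rfl⟩ : ∃ wk : Nat, (wk : Int) = k := ⟨k.toNat, Int.toNat_of_nonneg (by omega)⟩
  have hwk1 : 1 ≤ wk := by exact_mod_cast h1
  have hwkn : wk ≤ T.length := by exact_mod_cast h2
  simp only [ksuma_alt, Int.toNat_natCast]
  rw [pvLoopB1 T wk wk le_rfl, pvLoopB2 T wk hwk1 T.length hwkn le_rfl]
  rw [PySem.List.slice_from _ (by omega : (0 : Int) ≤ ((T.length : Nat) : Int) - (wk : Int))]
  rw [show (((T.length : Nat) : Int) - (wk : Int)).toNat = T.length - wk from by omega]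
  obtain ⟨h, t, hw⟩ : ∃ h t, (pvG T wk T.length).drop (T.length - wk) = h :: t := by
    cases hx : (pvG T wk T.length).drop (T.length - wk) with
    | nil =>
      have : ((pvG T wk T.length).drop (T.length - wk)).length = wk := by
        simp only [List.length_drop, pvG_length]
        omega
      rw [hx] at this
      simp at this
      omega
    | cons a b => exact ⟨a, b, rfl⟩
  rw [hw]
  have funeq : (fun (a b : Int) => if b < a then b else a) = min := by
    funext a b
    rw [min_def]
    split_ifs <;> omega
  rw [funeq]
  rfl

-- ===== VERDICT (by name: the statement is the Claim_ definition above) =====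
theorem ksuma_spec : Claim_equal_ksuma := by
  intro T k _ hpre
  unfold Spec_ksuma
  rw [ksuma_eq_spec T k hpre.1 hpre.2, ksuma_alt_eq_spec T k hpre.1 hpre.2]
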